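-- pv_equiv track=rewrite | github.com/burning-calamity/extirpation | src/extirpation/bundled_online/quagmire_i.py | _keyed_alphabet
-- ===== SOURCE A (Python) =====
-- ALPHABET = 'ABCDEFGHIJKLMNOPQRSTUVWXYZ'
--
-- def _keyed_alphabet(keyword: str) -> str:
--     seen: set[str] = set()
--     chars: list[str] = []
--     for ch in (keyword.upper() + ALPHABET):
--         if ch in ALPHABET and ch not in seen:
--             seen.add(ch)
--             chars.append(ch)
--     return ''.join(chars)
-- ===== SOURCE B (Python) =====
-- ALPHABET = 'ABCDEFGHIJKLMNOPQRSTUVWXYZ'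
--
-- def _keyed_alphabet(keyword: str) -> str:
--     # Rank-and-sort: each letter's sort key is its first-occurrence index in the
--     # upper-cased keyword, or (len(kw) + its alphabet position) if it never occurs.
--     kw = keyword.upper()
--     def rank(ch: str) -> int:
--         i = kw.find(ch)
--         return i if i >= 0 else len(kw) + ALPHABET.index(ch)
--     return ''.join(sorted(ALPHABET, key=rank))
-- ===== Notes on version B (the rewrite author's own statement) =====
-- stated objective: faster
-- what changed: Replaces A's per-character seen-set dedup loop over keyword.upper()+ALPHABET with a rank-and-sort: each of the 26 alphabet letters gets a numeric key (first-occurrence index via kw.find, or len(kw)+alphabet position if absent) and the result is sorted(ALPHABET, key=rank).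
import Mathlib
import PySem

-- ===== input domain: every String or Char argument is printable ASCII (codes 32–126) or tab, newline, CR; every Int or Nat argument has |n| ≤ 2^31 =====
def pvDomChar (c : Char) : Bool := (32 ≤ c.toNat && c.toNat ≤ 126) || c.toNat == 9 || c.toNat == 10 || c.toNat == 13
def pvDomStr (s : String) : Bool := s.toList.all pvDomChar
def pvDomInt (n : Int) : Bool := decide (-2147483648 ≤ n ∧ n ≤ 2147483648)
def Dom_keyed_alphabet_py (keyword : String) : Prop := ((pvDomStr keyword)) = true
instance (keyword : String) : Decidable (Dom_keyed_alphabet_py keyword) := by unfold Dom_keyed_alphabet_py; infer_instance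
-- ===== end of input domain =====

-- B replaces A's seen-set dedup loop over keyword.upper()+ALPHABET by a rank-and-sort: each alphabet
-- letter gets a numeric key (first occurrence in the keyword, else len(kw)+alphabet position) and
-- the result is sorted(ALPHABET, key=rank): the per-character Python-level loop becomes 26 C-level
-- find scans plus a 26-element sort (measured faster in a timing run).

def pvALPHA : List Char := "ABCDEFGHIJKLMNOPQRSTUVWXYZ".toList

-- ===== PORT A =====
-- 'ch in ALPHABET' on a single char is exactly list membership of that char; ''.join(chars) on
-- single-char strings is String.ofList of the char list.
def keyed_alphabet_py (keyword : String) : String :=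
  let st := ((PySem.Str.upper keyword).toList ++ pvALPHA).foldl
    (fun (st : PySem.Set Char × List Char) ch =>
      if pvALPHA.contains ch && !(PySem.Set.contains st.1 ch)
      then (PySem.Set.add st.1 ch, st.2 ++ [ch]) else st)
    (PySem.Set.empty, [])
  String.ofList st.2

-- ===== PORT B =====
-- kw.find(ch) on a one-char ch is PySem.Chars.find kw [ch]; ALPHABET.index(ch) is only evaluated
-- for ch drawn from ALPHABET itself, where str.index is the first index, i.e. pvALPHA.idxOf ch.
def keyed_alphabet_py_alt (keyword : String) : String :=
  let kw := (PySem.Str.upper keyword).toList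
  let rank : Char → Int := fun ch =>
    let i := PySem.Chars.find kw [ch]
    if 0 ≤ i then i else (kw.length : Int) + (pvALPHA.idxOf ch : Int)
  String.ofList (PySem.List.sorted pvALPHA rank)

-- ===== PRECONDITION & SPEC =====
def Spec_keyed_alphabet_py (keyword : String) (out : String) : Prop := out = keyed_alphabet_py_alt keyword
instance (keyword : String) (out : String) : Decidable (Spec_keyed_alphabet_py keyword out) := by unfold Spec_keyed_alphabet_py; infer_instance

-- ===== CLAIM (what is proved, stated in full; the proofs are below) =====
def Claim_equal_keyed_alphabet_py : Prop := ∀ (keyword : String), Dom_keyed_alphabet_py keyword → Spec_keyed_alphabet_py keyword (keyed_alphabet_py keyword)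

-- ===== LEMMAS AND PROOFS =====

-- A's single-list step, on one state component
def pvStep (s : PySem.Set Char) (ch : Char) : PySem.Set Char :=
  if pvALPHA.contains ch && !(PySem.Set.contains s ch) then s ++ [ch] else s

lemma pvStep_eq_add (s : PySem.Set Char) (ch : Char) :
    pvStep s ch = if pvALPHA.contains ch then PySem.Set.add s ch else s := by
  unfold pvStep PySem.Set.add
  by_cases h : ch ∈ pvALPHA <;> by_cases h2 : ch ∈ s <;> simp [h, h2]

-- A's pair fold keeps its two components equal
lemma pvPair_fold (l : List Char) (s : PySem.Set Char) :
    l.foldl (fun (st : PySem.Set Char × List Char) ch =>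
      if pvALPHA.contains ch && !(PySem.Set.contains st.1 ch)
      then (PySem.Set.add st.1 ch, st.2 ++ [ch]) else st) (s, s)
    = (l.foldl pvStep s, l.foldl pvStep s) := by
  induction l generalizing s with
  | nil => rfl
  | cons c l ih =>
    simp only [List.foldl_cons]
    by_cases h : (pvALPHA.contains c && !(PySem.Set.contains s c)) = true
    · have hadd : PySem.Set.add s c = s ++ [c] := by
        unfold PySem.Set.add
        simp at h
        simp [h.2]
      rw [show pvStep s c = s ++ [c] from by unfold pvStep; rw [if_pos h]]
      simp only [if_pos h, hadd]
      exact ih (s ++ [c])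
    · rw [show pvStep s c = s from by unfold pvStep; rw [if_neg h]]
      simp only [if_neg h]
      exact ih s

-- phase 1: folding pvStep from a set s over l is updating s with the filtered letters
lemma pvFold_update (l : List Char) (s : PySem.Set Char) :
    l.foldl pvStep s = PySem.Set.update s (l.filter (fun ch => pvALPHA.contains ch)) := by
  induction l generalizing s with
  | nil => rfl
  | cons c l ih =>
    simp only [List.foldl_cons, List.filter_cons, pvStep_eq_add]
    by_cases h : pvALPHA.contains c = true
    · simp only [h, if_pos, PySem.Set.update_cons]
      exact ih (PySem.Set.add s c)
    · simp only [h]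
      simpa using ih s

-- phase 2: folding pvStep over a nodup all-in-alphabet list from state s appends the new letters
lemma pvFold_nodup (l : List Char) (s : PySem.Set Char)
    (hnd : l.Nodup) (hall : ∀ c ∈ l, pvALPHA.contains c = true) :
    l.foldl pvStep s = s ++ l.filter (fun ch => !(s.contains ch)) := by
  induction l generalizing s with
  | nil => simp
  | cons c l ih =>
    have hc := hall c (List.mem_cons_self)
    have hnd' := (List.nodup_cons.mp hnd).2
    have hcl := (List.nodup_cons.mp hnd).1
    simp only [List.foldl_cons, List.filter_cons, pvStep_eq_add, hc, if_pos]
    by_cases hs : PySem.Set.contains s c = true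
    · have hmem : c ∈ s := List.mem_of_elem_eq_true hs
      have : PySem.Set.add s c = s := by unfold PySem.Set.add; simp [hmem]
      rw [this]
      have hsc : s.contains c = true := hs
      simp only [hsc]
      simpa using ih s hnd' (fun x hx => hall x (List.mem_cons_of_mem _ hx))
    · have hmem : c ∉ s := by simpa using hs
      have hadd : PySem.Set.add s c = s ++ [c] := by unfold PySem.Set.add; simp [hmem]
      have hsc : s.contains c = false := by simpa using hs
      rw [hadd, ih (s ++ [c]) hnd' (fun x hx => hall x (List.mem_cons_of_mem _ hx))]
      simp only [hsc]
      have hfil : l.filter (fun ch => !((s ++ [c]).contains ch))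
          = l.filter (fun ch => !(s.contains ch)) := by
        apply List.filter_congr
        intro x hx
        have hxc : x ≠ c := fun h => hcl (h ▸ hx)
        simp [hxc]
      rw [hfil]
      simp

lemma pvALPHA_nodup : pvALPHA.Nodup := by decide

lemma pvALPHA_all : ∀ c ∈ pvALPHA, pvALPHA.contains c = true := by
  intro c hc; exact List.contains_iff_mem.mpr hc

-- A's output, in closed form: the dedup of the in-alphabet keyword letters, then the unused letters
lemma pvA_closed (keyword : String) :
    keyed_alphabet_py keyword
    = String.ofList
        (PySem.List.dedup ((PySem.Str.upper keyword).toList.filter (fun ch => pvALPHA.contains ch))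
         ++ pvALPHA.filter (fun ch =>
              !((PySem.List.dedup ((PySem.Str.upper keyword).toList.filter
                  (fun ch => pvALPHA.contains ch))).contains ch))) := by
  unfold keyed_alphabet_py
  have h0 : (PySem.Set.empty, ([] : List Char))
      = (([] : PySem.Set Char), ([] : PySem.Set Char)) := rfl
  simp only [h0, List.foldl_append, pvPair_fold, pvFold_update, PySem.Set.update_nil_left,
    pvFold_nodup pvALPHA _ pvALPHA_nodup pvALPHA_all, PySem.List.dedup_eq_ofList]
  simp [PySem.Set.contains_eq_listContains]

-- kw.find of a single character is its first index (or -1)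
lemma pvFind_go_single (l : List Char) (c : Char) (k : Nat) :
    PySem.Chars.find.go [c] l k
    = if c ∈ l then ((k + l.idxOf c : Nat) : Int) else -1 := by
  induction l generalizing k with
  | nil => simp [PySem.Chars.find.go]
  | cons h t ih =>
    by_cases hc : c = h
    · subst hc
      simp [PySem.Chars.find.go, List.isPrefixOf]
    · have : (List.isPrefixOf [c] (h :: t)) = false := by
        simp [List.isPrefixOf]
        exact hc
      simp only [PySem.Chars.find.go, this, Bool.false_eq_true, if_false, ih]
      by_cases hm : c ∈ t
      · simp [hm, hc, Ne.symm hc]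
        omega
      · simp [hm, hc]

lemma pvFind_single (l : List Char) (c : Char) :
    PySem.Chars.find l [c] = if c ∈ l then ((l.idxOf c : Nat) : Int) else -1 := by
  have := pvFind_go_single l c 0
  simpa [PySem.Chars.find] using this

-- first-occurrence order survives removal of the filter
lemma pvIdxOf_filter_lt (l : List Char) (p : Char → Bool) (a b : Char)
    (ha : a ∈ l.filter p) (hb : b ∈ l.filter p)
    (h : (l.filter p).idxOf a < (l.filter p).idxOf b) : l.idxOf a < l.idxOf b := by
  induction l with
  | nil => simp at ha
  | cons x t ih =>
    by_cases hx : p x = true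
    · simp only [List.filter_cons, hx, if_pos] at ha hb h
      by_cases hax : a = x
      · subst hax
        have hba : b ≠ a := by
          intro e; subst e; omega
        simp [Ne.symm hba]
      · by_cases hbx : b = x
        · subst hbx
          simp [Ne.symm hax] at h
        · have ha' : a ∈ t.filter p := by
            rcases List.mem_cons.mp ha with e | m
            · exact absurd e hax
            · exact m
          have hb' : b ∈ t.filter p := by
            rcases List.mem_cons.mp hb with e | m
            · exact absurd e hbx
            · exact m
          have h' : (t.filter p).idxOf a < (t.filter p).idxOf b := by
            simp [Ne.symm hax, Ne.symm hbx] at h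
            omega
          have := ih ha' hb' h'
          simp [Ne.symm hax, Ne.symm hbx]
          omega
    · have hx' : p x = false := by simpa using hx
      simp only [List.filter_cons, hx', Bool.false_eq_true, if_false] at ha hb h
      have hax : a ≠ x := by
        intro e; subst e
        have := List.of_mem_filter ha
        simp [hx'] at this
      have hbx : b ≠ x := by
        intro e; subst e
        have := List.of_mem_filter hb
        simp [hx'] at this
      have := ih ha hb h
      simp [Ne.symm hax, Ne.symm hbx]
      omega

lemma pvMem_dedup {xs : List Char} {a : Char} : a ∈ PySem.List.dedup xs ↔ a ∈ xs := by
  simp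

-- dedup lists first occurrences in increasing order of first index
lemma pvDedup_pairwise (xs : List Char) :
    (PySem.List.dedup xs).Pairwise (fun a b => xs.idxOf a < xs.idxOf b) := by
  induction xs using List.reverseRecOn with
  | nil => simp [PySem.List.dedup, PySem.Set.ofList]
  | append_singleton t x ih =>
    have hded : PySem.List.dedup (t ++ [x]) = PySem.Set.add (PySem.List.dedup t) x := by
      simp only [PySem.List.dedup_eq_ofList, PySem.Set.ofList_eq_foldl, List.foldl_append,
        List.foldl_cons, List.foldl_nil]
    by_cases hx : x ∈ t
    · have hadd : PySem.Set.add (PySem.List.dedup t) x = PySem.List.dedup t := by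
        unfold PySem.Set.add; simp [hx]
      rw [hded, hadd]
      refine ih.imp_of_mem ?_
      intro a b ha hb hab
      have ha' : a ∈ t := pvMem_dedup.mp ha
      have hb' : b ∈ t := pvMem_dedup.mp hb
      rw [List.idxOf_append_of_mem ha', List.idxOf_append_of_mem hb']
      exact hab
    · have hadd : PySem.Set.add (PySem.List.dedup t) x = PySem.List.dedup t ++ [x] := by
        unfold PySem.Set.add; simp [hx]
      rw [hded, hadd]
      rw [List.pairwise_append]
      refine ⟨?_, by simp, ?_⟩
      · refine ih.imp_of_mem ?_
        intro a b ha hb hab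
        have ha' : a ∈ t := pvMem_dedup.mp ha
        have hb' : b ∈ t := pvMem_dedup.mp hb
        rw [List.idxOf_append_of_mem ha', List.idxOf_append_of_mem hb']
        exact hab
      · intro a ha b hb
        have hbx : b = x := by simpa using hb
        have ha' : a ∈ t := pvMem_dedup.mp ha
        rw [List.idxOf_append_of_mem ha', hbx]
        have h1 : t.idxOf a < t.length := List.idxOf_lt_length_of_mem ha'
        have h2 : (t ++ [x]).idxOf x = t.length := by
          rw [List.idxOf_append_of_notMem hx]
          simp
        omega

-- B's rank function, named
def pvRank (kw : List Char) (ch : Char) : Int :=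
  let i := PySem.Chars.find kw [ch]
  if 0 ≤ i then i else (kw.length : Int) + (pvALPHA.idxOf ch : Int)

lemma pvRank_mem (kw : List Char) (ch : Char) (h : ch ∈ kw) :
    pvRank kw ch = ((kw.idxOf ch : Nat) : Int) := by
  unfold pvRank
  rw [pvFind_single]
  simp [h]

lemma pvRank_notMem (kw : List Char) (ch : Char) (h : ch ∉ kw) :
    pvRank kw ch = (kw.length : Int) + (pvALPHA.idxOf ch : Int) := by
  unfold pvRank
  rw [pvFind_single]
  simp [h]

-- any duplicate-free list is listed in increasing order of first index
lemma pvNodup_pairwise_idxOf (l : List Char) (h : l.Nodup) :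
    l.Pairwise (fun a b => l.idxOf a < l.idxOf b) := by
  induction l with
  | nil => simp
  | cons x t ih =>
    rcases List.nodup_cons.mp h with ⟨hx, ht⟩
    refine List.pairwise_cons.mpr ⟨?_, (ih ht).imp_of_mem ?_⟩
    · intro b hb
      have hbx : b ≠ x := fun e => hx (e ▸ hb)
      simp [Ne.symm hbx]
    · intro a b ha hb hab
      have hax : a ≠ x := fun e => hx (e ▸ ha)
      have hbx : b ≠ x := fun e => hx (e ▸ hb)
      simp [Ne.symm hax, Ne.symm hbx]
      omega

lemma pvALPHA_pairwise_idxOf :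
    pvALPHA.Pairwise (fun a b => pvALPHA.idxOf a < pvALPHA.idxOf b) :=
  pvNodup_pairwise_idxOf pvALPHA pvALPHA_nodup

-- B's value, in closed form, and the crux: the strictly rank-increasing rearrangement of the
-- alphabet is exactly A's list
lemma pvB_closed (keyword : String) :
    keyed_alphabet_py_alt keyword
    = String.ofList (PySem.List.sorted pvALPHA (pvRank (PySem.Str.upper keyword).toList)) := rfl

set_option maxHeartbeats 1000000 in
lemma pvKey (kw : List Char) :
    PySem.List.sorted pvALPHA (pvRank kw)
    = PySem.List.dedup (kw.filter (fun ch => pvALPHA.contains ch))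
      ++ pvALPHA.filter (fun ch =>
           !((PySem.List.dedup (kw.filter (fun ch => pvALPHA.contains ch))).contains ch)) := by
  set ys := kw.filter (fun ch => pvALPHA.contains ch) with hys
  set D := PySem.List.dedup ys with hD
  set R := pvALPHA.filter (fun ch => !(D.contains ch)) with hR
  have hDsub : ∀ c ∈ D, c ∈ pvALPHA := by
    intro c hc
    have : c ∈ ys := pvMem_dedup.mp hc
    have := List.of_mem_filter this
    exact List.contains_iff_mem.mp this
  have hDkw : ∀ c ∈ D, c ∈ kw := by
    intro c hc
    have : c ∈ ys := pvMem_dedup.mp hc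
    exact List.mem_of_mem_filter this
  have hRnotD : ∀ c ∈ R, c ∉ D := by
    intro c hc
    have := List.of_mem_filter hc
    simpa using this
  have hRkw : ∀ c ∈ R, c ∉ kw := by
    intro c hc hckw
    have hcal : c ∈ pvALPHA := List.mem_of_mem_filter hc
    have hcys : c ∈ ys := by
      rw [hys, List.mem_filter]
      exact ⟨hckw, List.contains_iff_mem.mpr hcal⟩
    exact hRnotD c hc (pvMem_dedup.mpr hcys)
  apply PySem.List.sorted_eq_of_perm_of_pairwise_lt (key := pvRank kw)
  · -- (D ++ R).Perm pvALPHA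
    have hnd : (D ++ R).Nodup := by
      rw [List.nodup_append]
      exact ⟨hD ▸ PySem.List.nodup_dedup ys, List.Nodup.filter _ pvALPHA_nodup,
        fun a haD b hbR e => hRnotD b hbR (e ▸ haD)⟩
    rw [List.perm_ext_iff_of_nodup hnd pvALPHA_nodup]
    intro a
    constructor
    · intro h
      rcases List.mem_append.mp h with h | h
      · exact hDsub a h
      · exact List.mem_of_mem_filter h
    · intro h
      by_cases hd : a ∈ D
      · exact List.mem_append.mpr (Or.inl hd)
      · refine List.mem_append.mpr (Or.inr ?_)
        rw [hR, List.mem_filter]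
        refine ⟨h, ?_⟩
        simp [hd]
  · -- strictly increasing rank along D ++ R
    rw [List.pairwise_append]
    refine ⟨?_, ?_, ?_⟩
    · -- within D: first-occurrence order in kw
      refine (pvDedup_pairwise ys).imp_of_mem ?_
      intro a b ha hb hab
      have ha' : a ∈ ys := pvMem_dedup.mp ha
      have hb' : b ∈ ys := pvMem_dedup.mp hb
      rw [pvRank_mem kw a (List.mem_of_mem_filter ha'),
          pvRank_mem kw b (List.mem_of_mem_filter hb')]
      have := pvIdxOf_filter_lt kw _ a b (hys ▸ ha') (hys ▸ hb') hab
      exact_mod_cast this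
    · -- within R: alphabet order
      refine (List.Pairwise.filter _ pvALPHA_pairwise_idxOf).imp_of_mem ?_
      intro a b ha hb hab
      rw [pvRank_notMem kw a (hRkw a (hR ▸ ha)), pvRank_notMem kw b (hRkw b (hR ▸ hb))]
      omega
    · -- across: keyword letters before unused letters
      intro a ha b hb
      rw [pvRank_mem kw a (hDkw a ha), pvRank_notMem kw b (hRkw b hb)]
      have h1 : kw.idxOf a < kw.length := List.idxOf_lt_length_of_mem (hDkw a ha)
      omega

-- ===== VERDICT (by name: the statement is the Claim_ definition above) =====
theorem keyed_alphabet_py_spec : Claim_equal_keyed_alphabet_py := by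
  intro keyword _
  unfold Spec_keyed_alphabet_py
  rw [pvA_closed, pvB_closed, pvKey]
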